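-- pv_equiv track=rewrite | github.com/nicholyx/ai-skills | skills/text-to-sql/scripts/db_extractor.py | detect_primary_keys
-- ===== SOURCE A (Python) =====
-- def detect_primary_keys(columns_info):
--     """Detect primary key columns."""
--     pk_columns = {}
--
--     for col in columns_info:
--         if col.get('COLUMN_KEY') == 'PRI':
--             table = col['TABLE_NAME']
--             if table not in pk_columns:
--                 pk_columns[table] = []
--             pk_columns[table].append(col['COLUMN_NAME'])
--
--     return pk_columns
-- ===== SOURCE B (Python) =====
-- def detect_primary_keys(columns_info):
--     """Detect primary key columns."""
--     # Filter once into (table, column) pairs, then group by repeated partitioning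
--     # on the first remaining table (first-occurrence order, stable within a table).
--     pairs = [(col['TABLE_NAME'], col['COLUMN_NAME'])
--              for col in columns_info if col.get('COLUMN_KEY') == 'PRI']
--     pk_columns = {}
--     rest = pairs
--     while rest:
--         t = rest[0][0]
--         pk_columns[t] = [c for (tt, c) in rest if tt == t]
--         rest = [p for p in rest if p[0] != t]
--     return pk_columns
-- ===== Notes on version B (the rewrite author's own statement) =====
-- stated objective: alternative
-- what changed: Replaces incremental dict accumulation with a single filter into (table, column) pairs followed by partition-based grouping: repeatedly peel off the first remaining table and collect all its columns at once.
import Mathlib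
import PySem

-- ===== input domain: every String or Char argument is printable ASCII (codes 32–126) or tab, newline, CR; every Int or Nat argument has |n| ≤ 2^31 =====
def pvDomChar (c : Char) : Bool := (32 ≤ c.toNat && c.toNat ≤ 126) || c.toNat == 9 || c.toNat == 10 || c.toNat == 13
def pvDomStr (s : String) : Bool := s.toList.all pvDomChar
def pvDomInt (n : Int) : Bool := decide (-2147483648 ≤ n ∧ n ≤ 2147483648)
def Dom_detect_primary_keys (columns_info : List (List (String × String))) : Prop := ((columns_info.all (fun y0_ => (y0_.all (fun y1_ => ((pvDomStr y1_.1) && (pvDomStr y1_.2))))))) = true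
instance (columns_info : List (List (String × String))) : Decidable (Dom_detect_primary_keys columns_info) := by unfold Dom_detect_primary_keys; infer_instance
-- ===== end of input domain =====

-- B replaces A's incremental dict accumulation by a filter into (table, column) pairs followed by partition-based grouping; objective: alternative (same results, different algorithm).


-- ===== PORT A =====
-- "if table not in pk_columns: pk_columns[table] = []; pk_columns[table].append(...)"
-- on the assoc-list dict: update the existing entry in place, or append a fresh one.
def addPK (pk : List (String × List String)) (t c : String) : List (String × List String) :=
  if pk.any (fun e => e.1 == t) then
    pk.map (fun e => if e.1 == t then (e.1, e.2 ++ [c]) else e)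
  else pk ++ [(t, [c])]

-- col['TABLE_NAME'] / col['COLUMN_NAME'] raise KeyError when missing; ported as getD ""
-- (exact on Pre_, which guarantees both keys are present on every 'PRI' row).
def detect_primary_keys (columns_info : List (List (String × String))) : List (String × List String) :=
  columns_info.foldl
    (fun pk col =>
      if PySem.Dict.get? ⟨col⟩ "COLUMN_KEY" == some "PRI" then
        addPK pk (PySem.Dict.getD ⟨col⟩ "TABLE_NAME" "") (PySem.Dict.getD ⟨col⟩ "COLUMN_NAME" "")
      else pk)
    []

-- ===== PORT B =====
-- the filtered (table, column) pairs of the 'PRI' rows (same KeyError caveat as A, ported as getD "")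
def priPairs (columns_info : List (List (String × String))) : List (String × String) :=
  columns_info.filterMap
    (fun col =>
      if PySem.Dict.get? ⟨col⟩ "COLUMN_KEY" == some "PRI" then
        some (PySem.Dict.getD ⟨col⟩ "TABLE_NAME" "", PySem.Dict.getD ⟨col⟩ "COLUMN_NAME" "")
      else none)

-- the while loop of Source B: peel off the first remaining table with all its columns, recurse on the rest
def groupPairs : List (String × String) → List (String × List String)
  | [] => []
  | (t, c) :: tl =>
      (t, c :: (tl.filter (fun p => p.1 == t)).map Prod.snd) ::
      groupPairs (tl.filter (fun p => p.1 != t))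
termination_by l => l.length
decreasing_by
  simpa using (List.length_filter_le _ tl.attach).trans (by simp)

def detect_primary_keys_alt (columns_info : List (List (String × String))) : List (String × List String) :=
  groupPairs (priPairs columns_info)

-- ===== PRECONDITION & SPEC =====
-- Pre_ excludes exactly the inputs where Python A raises KeyError: a row whose
-- COLUMN_KEY is 'PRI' but which lacks the TABLE_NAME or COLUMN_NAME key.
def Pre_detect_primary_keys (columns_info : List (List (String × String))) : Prop :=
  ∀ col ∈ columns_info,
    PySem.Dict.get? (PySem.Dict.mk col) "COLUMN_KEY" = some "PRI" →
      (PySem.Dict.get? (PySem.Dict.mk col) "TABLE_NAME").isSome = true ∧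
      (PySem.Dict.get? (PySem.Dict.mk col) "COLUMN_NAME").isSome = true
instance (columns_info : List (List (String × String))) : Decidable (Pre_detect_primary_keys columns_info) := by unfold Pre_detect_primary_keys; infer_instance

def pvWitness_detect_primary_keys : (List (List (String × String))) :=
  [[("COLUMN_KEY", "PRI"), ("TABLE_NAME", "users"), ("COLUMN_NAME", "id")],
   [("COLUMN_KEY", ""), ("TABLE_NAME", "users"), ("COLUMN_NAME", "name")],
   [("COLUMN_KEY", "PRI"), ("TABLE_NAME", "orders"), ("COLUMN_NAME", "oid")],
   [("COLUMN_KEY", "PRI"), ("TABLE_NAME", "users"), ("COLUMN_NAME", "tenant")]]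

def Spec_detect_primary_keys (columns_info : List (List (String × String))) (out : List (String × List String)) : Prop := out = detect_primary_keys_alt columns_info
instance (columns_info : List (List (String × String))) (out : List (String × List String)) : Decidable (Spec_detect_primary_keys columns_info out) := by unfold Spec_detect_primary_keys; infer_instance

-- ===== CLAIM (what is proved, stated in full; the proofs are below) =====
def Claim_equal_detect_primary_keys : Prop := ∀ (columns_info : List (List (String × String))), Dom_detect_primary_keys columns_info → Pre_detect_primary_keys columns_info → Spec_detect_primary_keys columns_info (detect_primary_keys columns_info)

-- ===== LEMMAS AND PROOFS =====

lemma groupPairs_nil : groupPairs [] = [] := by rw [groupPairs]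

lemma groupPairs_cons (t c : String) (tl : List (String × String)) :
    groupPairs ((t, c) :: tl) =
      (t, c :: (tl.filter (fun p => p.1 == t)).map Prod.snd) ::
      groupPairs (tl.filter (fun p => p.1 != t)) := by rw [groupPairs]

-- characterisation of A's fold from an arbitrary dict state d over a pair list
def mergeAll (d : List (String × List String)) (pairs : List (String × String)) : List (String × List String) :=
  d.map (fun e => (e.1, e.2 ++ (pairs.filter (fun p => p.1 == e.1)).map Prod.snd)) ++
  groupPairs (pairs.filter (fun p => !(d.any (fun e => e.1 == p.1))))

lemma foldl_eq_pairs (columns_info : List (List (String × String)))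
    (d : List (String × List String)) :
    columns_info.foldl
      (fun pk col =>
        if PySem.Dict.get? ⟨col⟩ "COLUMN_KEY" == some "PRI" then
          addPK pk (PySem.Dict.getD ⟨col⟩ "TABLE_NAME" "") (PySem.Dict.getD ⟨col⟩ "COLUMN_NAME" "")
        else pk) d
    = (priPairs columns_info).foldl (fun pk p => addPK pk p.1 p.2) d := by
  induction columns_info generalizing d with
  | nil => rfl
  | cons col tl ih =>
      simp only [List.foldl_cons, priPairs, List.filterMap_cons]
      split <;> simp_all [priPairs]

lemma foldl_addPK_eq_mergeAll (pairs : List (String × String))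
    (d : List (String × List String)) :
    pairs.foldl (fun pk p => addPK pk p.1 p.2) d = mergeAll d pairs := by
  induction pairs generalizing d with
  | nil => simp [mergeAll, groupPairs_nil]
  | cons hd tl ih =>
      obtain ⟨t, c⟩ := hd
      simp only [List.foldl_cons, ih]
      by_cases h : d.any (fun e => e.1 == t) = true
      · -- existing table: addPK updates the entry in place
        unfold mergeAll
        rw [show addPK d t c = d.map (fun e => if e.1 = t then (e.1, e.2 ++ [c]) else e) by
              simp [addPK, h]]
        congr 1
        · rw [List.map_map]
          apply List.map_congr_left
          intro e _
          by_cases he : e.1 = t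
          · simp [he]
          · have hts : (t == e.1) = false := by
              simp only [beq_eq_false_iff_ne, ne_eq]
              exact fun hh => he hh.symm
            simp [he, hts]
        · congr 1
          have h1 : List.filter (fun p => !(d.any (fun e => e.1 == p.1))) ((t, c) :: tl)
              = List.filter (fun p => !(d.any (fun e => e.1 == p.1))) tl := by
            simp [h]
          rw [h1]
          apply List.filter_congr
          intro p _
          simp only [List.any_map]
          congr 2
          funext e
          by_cases he : e.1 = t <;> simp [he]
      · -- fresh table: addPK appends a new entry at the end
        have hne : ∀ e ∈ d, (e.1 == t) = false := by
          intro e he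
          by_contra hc
          exact h (List.any_eq_true.mpr ⟨e, he, by simpa using hc⟩)
        unfold mergeAll
        rw [show addPK d t c = d ++ [(t, [c])] by simp [addPK, h]]
        have hmap : (d ++ [(t, [c])]).map
              (fun e => (e.1, e.2 ++ (tl.filter (fun p => p.1 == e.1)).map Prod.snd))
            = d.map (fun e => (e.1, e.2 ++ ((((t, c) :: tl).filter (fun p => p.1 == e.1)).map Prod.snd)))
              ++ [(t, [c] ++ (tl.filter (fun p => p.1 == t)).map Prod.snd)] := by
          rw [List.map_append]
          congr 1
          · apply List.map_congr_left
            intro e he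
            have hts : (t == e.1) = false := by
              have := hne e he
              simp only [beq_eq_false_iff_ne, ne_eq] at this ⊢
              exact fun hh => this hh.symm
            simp [hts]
        have hcons : ((t, c) :: tl).filter (fun p => !(d.any (fun e => e.1 == p.1)))
            = (t, c) :: tl.filter (fun p => !(d.any (fun e => e.1 == p.1))) := by
          simp [h]
        have hff1 : (tl.filter (fun p => !(d.any (fun e => e.1 == p.1)))).filter (fun p => p.1 == t)
            = tl.filter (fun p => p.1 == t) := by
          rw [List.filter_filter]
          apply List.filter_congr
          intro p _
          by_cases hp : p.1 = t
          · simp [hp, Bool.eq_false_iff.mpr h]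
          · simp [hp]
        have hff2 : (tl.filter (fun p => !(d.any (fun e => e.1 == p.1)))).filter (fun p => p.1 != t)
            = tl.filter (fun p => !((d ++ [(t, [c])]).any (fun e => e.1 == p.1))) := by
          rw [List.filter_filter]
          apply List.filter_congr
          intro p _
          by_cases hp : p.1 = t
          · simp [hp, Bool.eq_false_iff.mpr h]
          · have h2 : (t == p.1) = false := by
              simp only [beq_eq_false_iff_ne, ne_eq]
              exact fun hh => hp hh.symm
            simp [hp, h2]
        rw [hmap, hcons, groupPairs_cons, hff1, hff2]
        simp [List.append_assoc]


-- ===== VERDICT (by name: the statement is the Claim_ definition above) =====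
theorem detect_primary_keys_spec : Claim_equal_detect_primary_keys := by
  intro columns_info _ _
  unfold Spec_detect_primary_keys detect_primary_keys detect_primary_keys_alt
  rw [foldl_eq_pairs, foldl_addPK_eq_mergeAll]
  simp [mergeAll]
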